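-- pv_equiv track=rewrite | github.com/chouaibKr0/complexity-project | src/solvers/three_sat_solver.py | _clause_status
-- ===== SOURCE A (Python) =====
-- def _clause_status(C: list[int], P: dict) -> int:
--     """
--     Determine the status of clause C under partial assignment P.
--     Args:
--         C: Clause (list of literals).
--         P: Partial assignment (some variables assigned).
--     Returns:
--         SATISFIED, FALSIFIED, or UNRESOLVED.
--     """
--     all_assigned = True
--     for l in C:
--         var = abs(l)
--         val = P.get(var)
--         if val is None:
--             all_assigned = False
--             continue
--         if val == (l > 0):
--             return SATISFIED
--     return FALSIFIED if all_assigned else UNRESOLVED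
--
-- SATISFIED = 0
--
-- FALSIFIED = 1
--
-- UNRESOLVED = 2
-- ===== SOURCE B (Python) =====
-- SATISFIED = 0
-- FALSIFIED = 1
-- UNRESOLVED = 2
--
-- def _clause_status(C: list[int], P: dict) -> int:
--     if any(P.get(abs(l)) == (l > 0) for l in C):
--         return SATISFIED
--     if all(P.get(abs(l)) is not None for l in C):
--         return FALSIFIED
--     return UNRESOLVED
-- ===== Notes on version B (the rewrite author's own statement) =====
-- stated objective: simpler
-- what changed: Replaces the single flag-carrying loop (early return + all_assigned accumulator) with two independent declarative scans: any() for satisfaction, then all() for completeness.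
import Mathlib
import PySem

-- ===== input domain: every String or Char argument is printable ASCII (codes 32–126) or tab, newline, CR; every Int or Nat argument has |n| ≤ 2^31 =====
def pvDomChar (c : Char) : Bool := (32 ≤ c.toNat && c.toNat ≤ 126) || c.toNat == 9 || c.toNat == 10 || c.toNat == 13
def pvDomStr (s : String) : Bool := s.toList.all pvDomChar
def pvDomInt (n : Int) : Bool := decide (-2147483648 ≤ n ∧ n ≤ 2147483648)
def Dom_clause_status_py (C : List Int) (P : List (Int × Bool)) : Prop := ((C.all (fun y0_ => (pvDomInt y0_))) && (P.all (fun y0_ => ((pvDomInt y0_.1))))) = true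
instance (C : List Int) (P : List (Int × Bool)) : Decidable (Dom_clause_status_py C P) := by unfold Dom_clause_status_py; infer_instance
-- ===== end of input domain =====

-- B replaces A's flag-carrying loop with two independent any/all scans (objective: simpler).
-- ===== PORT A =====
-- loop of A: state = all_assigned flag, early return on a satisfied literal
def clauseStatusLoop (P : List (Int × Bool)) : List Int → Bool → Int
  | [], allAssigned => if allAssigned then 1 else 2
  | l :: rest, allAssigned =>
      match (PySem.Dict.mk P).get? |l| with
      | none => clauseStatusLoop P rest false
      | some val => if val = decide (l > 0) then 0 else clauseStatusLoop P rest allAssigned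

def clause_status_py (C : List Int) (P : List (Int × Bool)) : Int :=
  clauseStatusLoop P C true

-- ===== PORT B =====
def clause_status_py_alt (C : List Int) (P : List (Int × Bool)) : Int :=
  if C.any (fun l => (PySem.Dict.mk P).get? |l| == some (decide (l > 0))) then 0
  else if C.all (fun l => ((PySem.Dict.mk P).get? |l|).isSome) then 1
  else 2

-- ===== PRECONDITION & SPEC =====
def Spec_clause_status_py (C : List Int) (P : List (Int × Bool)) (out : Int) : Prop := out = clause_status_py_alt C P
instance (C : List Int) (P : List (Int × Bool)) (out : Int) : Decidable (Spec_clause_status_py C P out) := by unfold Spec_clause_status_py; infer_instance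

-- ===== CLAIM (what is proved, stated in full; the proofs are below) =====
def Claim_equal_clause_status_py : Prop := ∀ (C : List Int) (P : List (Int × Bool)), Dom_clause_status_py C P → Spec_clause_status_py C P (clause_status_py C P)

-- ===== LEMMAS AND PROOFS =====

-- ===== VERDICT (by name: the statement is the Claim_ definition above) =====
-- loop characterisation: A's loop equals B's two-scan value, for any flag state
theorem clauseStatusLoop_eq (P : List (Int × Bool)) (C : List Int) (aa : Bool) :
    clauseStatusLoop P C aa =
      if C.any (fun l => (PySem.Dict.mk P).get? |l| == some (decide (l > 0))) then 0
      else if (C.all (fun l => ((PySem.Dict.mk P).get? |l|).isSome)) && aa then 1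
      else 2 := by
  induction C generalizing aa with
  | nil => cases aa <;> simp [clauseStatusLoop]
  | cons l rest ih =>
    simp only [clauseStatusLoop]
    cases h : (PySem.Dict.mk P).get? |l| with
    | none => simp [List.any_cons, List.all_cons, h, ih]
    | some v =>
      by_cases hv : v = decide (l > 0)
      · simp [List.any_cons, h, hv]
      · simp [List.any_cons, List.all_cons, h, hv, ih]

theorem clause_status_py_spec : Claim_equal_clause_status_py := by
  intro C P _
  unfold Spec_clause_status_py clause_status_py clause_status_py_alt
  rw [clauseStatusLoop_eq]
  simp
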